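-- pv_equiv track=rewrite | github.com/nicos-files/argentina-capital-router | src/reports/crypto_paper_semantics.py | _quote_asset_from_symbol
-- ===== SOURCE A (Python) =====
-- _QUOTE_ASSET_SUFFIXES: tuple[str, ...] = (
--     "USDT", "USDC", "BUSD", "FDUSD", "TUSD", "DAI", "USD", "EUR", "BTC", "ETH", "BNB",
-- )
--
-- def _quote_asset_from_symbol(symbol: str) -> str | None:
--     """Best-effort quote-asset extraction for Binance-style spot symbols.
--
--     Returns ``None`` when the symbol does not match any known suffix; callers
--     must therefore tolerate ``None`` and fall back to a generic label.
--     """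
--
--     text = str(symbol or "").upper().strip()
--     if not text:
--         return None
--     for suffix in _QUOTE_ASSET_SUFFIXES:
--         if text.endswith(suffix) and len(text) > len(suffix):
--             return suffix
--     return None
-- ===== SOURCE B (Python) =====
-- _QUOTE_ASSET_SUFFIXES: tuple[str, ...] = (
--     "USDT", "USDC", "BUSD", "FDUSD", "TUSD", "DAI", "USD", "EUR", "BTC", "ETH", "BNB",
-- )
--
-- # Suffixes bucketed by length, built once; lengths scanned longest-first.
-- _SUFFIXES_BY_LEN: dict[int, set[str]] = {}
-- for _s in _QUOTE_ASSET_SUFFIXES: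
--     _SUFFIXES_BY_LEN.setdefault(len(_s), set()).add(_s)
-- _LENGTHS_DESC: list[int] = sorted(_SUFFIXES_BY_LEN, reverse=True)
--
--
-- def _quote_asset_from_symbol(symbol: str) -> str | None:
--     text = str(symbol or "").upper().strip()
--     if not text:
--         return None
--     for n in _LENGTHS_DESC:
--         if n < len(text):
--             tail = text[-n:]
--             if tail in _SUFFIXES_BY_LEN[n]:
--                 return tail
--     return None
-- ===== Notes on version B (the rewrite author's own statement) =====
-- stated objective: idiomatic
-- what changed: A scans the flat suffix tuple checking endswith on each; B builds a length-to-suffix-set index once at module load and, per call, checks only the three candidate tails text[-n:] longest-first via set membership.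
import Mathlib
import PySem

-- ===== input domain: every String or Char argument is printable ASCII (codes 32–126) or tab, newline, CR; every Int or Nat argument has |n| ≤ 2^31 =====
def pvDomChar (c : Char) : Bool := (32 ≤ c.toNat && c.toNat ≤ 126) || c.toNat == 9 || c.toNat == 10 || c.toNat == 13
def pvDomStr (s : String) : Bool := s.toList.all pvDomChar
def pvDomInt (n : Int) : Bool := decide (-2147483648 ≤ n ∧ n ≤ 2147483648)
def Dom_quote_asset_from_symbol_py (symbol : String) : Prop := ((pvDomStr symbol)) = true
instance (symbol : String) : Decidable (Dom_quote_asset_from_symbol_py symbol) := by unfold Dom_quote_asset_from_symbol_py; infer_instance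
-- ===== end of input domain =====

-- B replaces A's linear scan over the suffix tuple by a once-built length→suffix-set
-- index scanned longest-length-first (objective: idiomatic; same observable results).

-- ===== PORT A =====
def pvQuoteAssetSuffixes : List String :=
  ["USDT", "USDC", "BUSD", "FDUSD", "TUSD", "DAI", "USD", "EUR", "BTC", "ETH", "BNB"]

-- the 'for suffix in _QUOTE_ASSET_SUFFIXES' loop: first suffix passing both tests
def pvFindSuffixA (text : String) : List String → Option String
  | [] => none
  | s :: rest =>
    if PySem.Str.endswith text s && decide (PySem.Str.len s < PySem.Str.len text) then some s
    else pvFindSuffixA text rest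

def quote_asset_from_symbol_py (symbol : String) : Option String :=
  let text := PySem.Str.strip (PySem.Str.upper (if symbol = "" then "" else symbol))
  if text = "" then none
  else pvFindSuffixA text pvQuoteAssetSuffixes

-- ===== PORT B =====
-- module-level: _SUFFIXES_BY_LEN built by the setdefault/add loop
def pvSuffixesByLen : PySem.Dict Int (PySem.Set String) :=
  pvQuoteAssetSuffixes.foldl
    (fun d s => d.insert (PySem.Str.len s)
      (PySem.Set.add (d.getD (PySem.Str.len s) PySem.Set.empty) s))
    PySem.Dict.empty

-- module-level: _LENGTHS_DESC = sorted(_SUFFIXES_BY_LEN, reverse=True)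
def pvLengthsDesc : List Int :=
  PySem.List.sorted (PySem.Dict.keys pvSuffixesByLen) (fun x => x) true

-- the 'for n in _LENGTHS_DESC' loop (the dict lookup _SUFFIXES_BY_LEN[n] is ported
-- with getD: every n scanned is a key of the dict, so the default is never used)
def pvScanB (text : String) : List Int → Option String
  | [] => none
  | n :: rest =>
    if n < PySem.Str.len text then
      let tail := PySem.Str.slice text (some (-n)) none
      if PySem.Set.contains (pvSuffixesByLen.getD n PySem.Set.empty) tail then some tail
      else pvScanB text rest
    else pvScanB text rest

def quote_asset_from_symbol_py_alt (symbol : String) : Option String :=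
  let text := PySem.Str.strip (PySem.Str.upper (if symbol = "" then "" else symbol))
  if text = "" then none
  else pvScanB text pvLengthsDesc

-- ===== PRECONDITION & SPEC =====
def Spec_quote_asset_from_symbol_py (symbol : String) (out : Option String) : Prop := out = quote_asset_from_symbol_py_alt symbol
instance (symbol : String) (out : Option String) : Decidable (Spec_quote_asset_from_symbol_py symbol out) := by unfold Spec_quote_asset_from_symbol_py; infer_instance

-- ===== CLAIM (what is proved, stated in full; the proofs are below) =====
def Claim_equal_quote_asset_from_symbol_py : Prop := ∀ (symbol : String), Dom_quote_asset_from_symbol_py symbol → Spec_quote_asset_from_symbol_py symbol (quote_asset_from_symbol_py symbol)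

-- ===== LEMMAS AND PROOFS =====

-- "text has the k-char tail lit (and is strictly longer than k)"
abbrev pvHasTail (t : String) (k : Nat) (lit : String) : Prop :=
  k < t.toList.length ∧ t.toList.drop (t.toList.length - k) = lit.toList

-- first string of the list that is a proper tail of t, else e
def pvChain (t : String) (k : Nat) : List String → Option String → Option String
  | [], e => e
  | s :: r, e => if pvHasTail t k s then some s else pvChain t k r e

lemma condA (t s : String) (k : Nat) (hk : s.toList.length = k) :
    ((PySem.Str.endswith t s && decide (PySem.Str.len s < PySem.Str.len t)) = true) ↔
    pvHasTail t k s := by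
  rw [Bool.and_eq_true, decide_eq_true_eq, PySem.Str.endswith_eq, PySem.Chars.endswith_iff,
    List.suffix_iff_eq_drop, PySem.Str.len_eq, PySem.Str.len_eq, hk]
  constructor
  · rintro ⟨h1, h2⟩; exact ⟨by exact_mod_cast h2, h1.symm⟩
  · rintro ⟨h1, h2⟩; exact ⟨h2.symm, by exact_mod_cast h1⟩

lemma stepA (t s : String) (rest : List String) (k : Nat) (hk : s.toList.length = k) :
    pvFindSuffixA t (s :: rest) =
      if pvHasTail t k s then some s else pvFindSuffixA t rest := by
  simp only [pvFindSuffixA]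
  exact if_congr (condA t s k hk) rfl rfl

lemma chain_all_false (t : String) (k : Nat) (set : List String) (e : Option String)
    (h : ∀ s ∈ set, ¬ pvHasTail t k s) : pvChain t k set e = e := by
  induction set with
  | nil => rfl
  | cons s r ih =>
    simp only [pvChain]
    rw [if_neg (h s (by simp))]
    exact ih (fun x hx => h x (by simp [hx]))

lemma memIf (t : String) (k : Nat) (hl : k < t.toList.length) (tl : String)
    (htl : tl.toList = t.toList.drop (t.toList.length - k))
    (set : List String) (e : Option String) :
    (if PySem.Set.contains set tl then some tl else e) = pvChain t k set e := by
  induction set with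
  | nil => simp [PySem.Set.contains, pvChain]
  | cons s r ih =>
    by_cases hs : tl = s
    · subst hs
      have hmem : PySem.Set.contains (tl :: r) tl = true := by simp [PySem.Set.contains]
      rw [if_pos hmem]
      simp only [pvChain]
      rw [if_pos (⟨hl, htl.symm⟩ : pvHasTail t k tl)]
    · have hnot : ¬ pvHasTail t k s := by
        rintro ⟨_, hd⟩
        exact hs (String.toList_inj.mp (htl.trans hd))
      have hcon : PySem.Set.contains (s :: r) tl = PySem.Set.contains r tl := by
        simp [PySem.Set.contains, hs]
      rw [hcon]
      simp only [pvChain]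
      rw [if_neg hnot]
      exact ih

lemma bucketB (t : String) (nI : Int) (nN : Nat) (hcast : nI = (nN : Int)) (hpos : 0 < nN)
    (set : List String) (hset : pvSuffixesByLen.getD nI PySem.Set.empty = set)
    (rest : List Int) :
    pvScanB t (nI :: rest) = pvChain t nN set (pvScanB t rest) := by
  subst hcast
  by_cases hl : nN < t.toList.length
  · have hlI : ((nN : Int) < PySem.Str.len t) := by
      rw [PySem.Str.len_eq]; exact_mod_cast hl
    have htl : (PySem.Str.slice t (some (-(nN : Int))) none).toList =
        t.toList.drop (t.toList.length - nN) := by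
      rw [PySem.Str.toList_slice, PySem.Chars.slice_eq_listSlice,
        PySem.List.slice_from_neg_natCast _ nN hpos]
    simp only [pvScanB]
    rw [if_pos hlI, hset]
    exact memIf t nN hl _ htl set _
  · have hlI : ¬ ((nN : Int) < PySem.Str.len t) := by
      rw [PySem.Str.len_eq]; exact_mod_cast hl
    simp only [pvScanB]
    rw [if_neg hlI]
    exact (chain_all_false t nN set _ (fun s _ h => hl h.1)).symm

lemma scan_eq (t : String) :
    pvFindSuffixA t pvQuoteAssetSuffixes = pvScanB t pvLengthsDesc := by
  have hlen : pvLengthsDesc = [5, 4, 3] := by decide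
  have hA : pvFindSuffixA t pvQuoteAssetSuffixes =
      pvChain t 4 ["USDT", "USDC", "BUSD"]
        (pvChain t 5 ["FDUSD"]
          (pvChain t 4 ["TUSD"]
            (pvChain t 3 ["DAI", "USD", "EUR", "BTC", "ETH", "BNB"] none))) := by
    simp only [pvQuoteAssetSuffixes]
    rw [stepA t "USDT" _ 4 (by decide), stepA t "USDC" _ 4 (by decide),
      stepA t "BUSD" _ 4 (by decide), stepA t "FDUSD" _ 5 (by decide),
      stepA t "TUSD" _ 4 (by decide), stepA t "DAI" _ 3 (by decide),
      stepA t "USD" _ 3 (by decide), stepA t "EUR" _ 3 (by decide),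
      stepA t "BTC" _ 3 (by decide), stepA t "ETH" _ 3 (by decide),
      stepA t "BNB" _ 3 (by decide)]
    simp only [pvFindSuffixA, pvChain]
  have hB : pvScanB t pvLengthsDesc =
      pvChain t 5 ["FDUSD"]
        (pvChain t 4 ["USDT", "USDC", "BUSD", "TUSD"]
          (pvChain t 3 ["DAI", "USD", "EUR", "BTC", "ETH", "BNB"] none)) := by
    rw [hlen, bucketB t 5 5 (by norm_num) (by omega) ["FDUSD"] (by decide) _,
      bucketB t 4 4 (by norm_num) (by omega) ["USDT", "USDC", "BUSD", "TUSD"] (by decide) _,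
      bucketB t 3 3 (by norm_num) (by omega) ["DAI", "USD", "EUR", "BTC", "ETH", "BNB"] (by decide) _,
      show pvScanB t [] = none from rfl]
  rw [hA, hB]
  by_cases hF : pvHasTail t 5 "FDUSD"
  · obtain ⟨hFl, hFd⟩ := hF
    have hd4 : t.toList.drop (t.toList.length - 4) = "DUSD".toList := by
      rw [show t.toList.length - 4 = (t.toList.length - 5) + 1 from by omega,
        ← List.drop_drop, hFd]
      decide
    have nU : ¬ pvHasTail t 4 "USDT" := by
      rintro ⟨_, h⟩; exact absurd (hd4.symm.trans h) (by decide)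
    have nC : ¬ pvHasTail t 4 "USDC" := by
      rintro ⟨_, h⟩; exact absurd (hd4.symm.trans h) (by decide)
    have nB : ¬ pvHasTail t 4 "BUSD" := by
      rintro ⟨_, h⟩; exact absurd (hd4.symm.trans h) (by decide)
    simp only [pvChain]
    rw [if_neg nU, if_neg nC, if_neg nB,
      if_pos (⟨hFl, hFd⟩ : pvHasTail t 5 "FDUSD"),
      if_pos (⟨hFl, hFd⟩ : pvHasTail t 5 "FDUSD")]
  · simp only [pvChain]
    rw [if_neg hF, if_neg hF]

-- ===== VERDICT (by name: the statement is the Claim_ definition above) =====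
theorem quote_asset_from_symbol_py_spec : Claim_equal_quote_asset_from_symbol_py := by
  intro symbol _
  unfold Spec_quote_asset_from_symbol_py quote_asset_from_symbol_py quote_asset_from_symbol_py_alt
  by_cases h : PySem.Str.strip (PySem.Str.upper (if symbol = "" then "" else symbol)) = ""
  · simp [h]
  · simp only [if_neg h, scan_eq]
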